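-- pv_equiv track=rewrite | github.com/krishna-dhulipalla/CoreLink-AI | src/agent/model_config.py | _merge_model_init_kwargs
-- ===== SOURCE A (Python) =====
-- from typing import Any
--
-- def _merge_model_init_kwargs(base: dict[str, Any], extra: dict[str, Any]) -> dict[str, Any]:
--     merged = dict(base)
--     for key, value in extra.items():
--         if key in {"model_kwargs", "extra_body"} and isinstance(value, dict):
--             current = merged.get(key, {})
--             if isinstance(current, dict):
--                 merged[key] = {**current, **value}
--             else:
--                 merged[key] = dict(value)
--         else:
--             merged[key] = value
--     return merged
-- ===== SOURCE B (Python) =====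
-- def _merge_model_init_kwargs(base, extra):
--     merged = {**base, **extra}
--     for key in ("model_kwargs", "extra_body"):
--         if key in extra and isinstance(extra[key], dict):
--             base_val = base.get(key)
--             if isinstance(base_val, dict):
--                 merged[key] = {**base_val, **extra[key]}
--             else:
--                 merged[key] = dict(extra[key])
--     return merged
-- ===== Notes on version B (the rewrite author's own statement) =====
-- stated objective: simpler
-- what changed: replaces A's per-item loop with a branch on every key by one bulk merge {**base, **extra} followed by a fixup pass over just the two special keys
import Mathlib
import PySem

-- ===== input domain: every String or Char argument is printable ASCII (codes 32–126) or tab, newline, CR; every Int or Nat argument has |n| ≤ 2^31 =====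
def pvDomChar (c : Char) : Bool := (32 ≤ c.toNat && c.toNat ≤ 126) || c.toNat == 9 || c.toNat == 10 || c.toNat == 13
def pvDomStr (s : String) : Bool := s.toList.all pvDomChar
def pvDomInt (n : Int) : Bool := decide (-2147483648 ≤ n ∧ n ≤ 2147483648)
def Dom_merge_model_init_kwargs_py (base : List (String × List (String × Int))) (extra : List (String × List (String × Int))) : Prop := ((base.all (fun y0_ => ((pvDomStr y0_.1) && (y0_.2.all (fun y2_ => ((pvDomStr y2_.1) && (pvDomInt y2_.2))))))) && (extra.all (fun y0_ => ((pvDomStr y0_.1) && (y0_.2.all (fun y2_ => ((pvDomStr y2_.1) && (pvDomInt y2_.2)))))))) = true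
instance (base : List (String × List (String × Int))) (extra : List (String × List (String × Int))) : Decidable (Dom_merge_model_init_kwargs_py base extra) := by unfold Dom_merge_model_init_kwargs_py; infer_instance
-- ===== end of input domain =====

-- B replaces A's per-item loop-with-branch by one bulk merge {**base, **extra} plus a fixup of the
-- two special keys (simpler decomposition, same cost); equivalence is about the return value only.

-- ===== PORT A =====
-- {**current, **value}: build a dict from `current`, then insert every item of `value` (overwrite keeps position)
def pvDictUpdate (current value : List (String × Int)) : List (String × Int) :=
  (value.foldl (fun d p => PySem.Dict.insert d p.1 p.2) (PySem.Dict.mk current)).items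

def merge_model_init_kwargs_py (base : List (String × List (String × Int))) (extra : List (String × List (String × Int))) : List (String × List (String × Int)) :=
  -- merged = dict(base); for key, value in extra.items(): …
  (extra.foldl (fun merged kv =>
      if kv.1 == "model_kwargs" || kv.1 == "extra_body" then
        -- at this type every value and every merged.get(key, {}) is a dict, so both
        -- isinstance checks hold and the 'merged[key] = dict(value)' branch is unreachable
        PySem.Dict.insert merged kv.1 (pvDictUpdate (PySem.Dict.getD merged kv.1 []) kv.2)
      else
        PySem.Dict.insert merged kv.1 kv.2)
    (PySem.Dict.mk base)).items

-- ===== PORT B =====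
-- one fixup step of Source B's loop body: if key in extra (value is a dict at this type),
-- deep-merge with base's dict value, else store a fresh copy of extra[key]
def pvFixKey (base extra : List (String × List (String × Int))) (merged : PySem.Dict String (List (String × Int))) (key : String) : PySem.Dict String (List (String × Int)) :=
  match PySem.Dict.get? (PySem.Dict.mk extra) key with
  | none => merged
  | some v =>
    match PySem.Dict.get? (PySem.Dict.mk base) key with
    | some cur => PySem.Dict.insert merged key (pvDictUpdate cur v)
    | none => PySem.Dict.insert merged key v      -- dict(extra[key]): a fresh copy

def merge_model_init_kwargs_py_alt (base : List (String × List (String × Int))) (extra : List (String × List (String × Int))) : List (String × List (String × Int)) :=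
  -- merged = {**base, **extra}
  let merged := extra.foldl (fun d p => PySem.Dict.insert d p.1 p.2) (PySem.Dict.mk base)
  -- for key in ("model_kwargs", "extra_body"): …
  (pvFixKey base extra (pvFixKey base extra merged "model_kwargs") "extra_body").items

-- ===== PRECONDITION & SPEC =====
-- Pre_ excludes `extra` association lists with duplicate keys (outer, or inside a value list):
-- those do not represent Python dicts, so A is never called on them.
def Pre_merge_model_init_kwargs_py (base : List (String × List (String × Int))) (extra : List (String × List (String × Int))) : Prop :=
  (extra.map Prod.fst).Nodup ∧ ∀ p ∈ extra, (p.2.map Prod.fst).Nodup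
instance (base : List (String × List (String × Int))) (extra : List (String × List (String × Int))) : Decidable (Pre_merge_model_init_kwargs_py base extra) := by unfold Pre_merge_model_init_kwargs_py; infer_instance

def pvWitness_merge_model_init_kwargs_py : (List (String × List (String × Int))) × (List (String × List (String × Int))) :=
  ([("model_kwargs", [("a", 1)]), ("x", [])], [("model_kwargs", [("b", 2)]), ("y", [("c", 3)])])

def Spec_merge_model_init_kwargs_py (base : List (String × List (String × Int))) (extra : List (String × List (String × Int))) (out : List (String × List (String × Int))) : Prop := out = merge_model_init_kwargs_py_alt base extra
instance (base : List (String × List (String × Int))) (extra : List (String × List (String × Int))) (out : List (String × List (String × Int))) : Decidable (Spec_merge_model_init_kwargs_py base extra out) := by unfold Spec_merge_model_init_kwargs_py; infer_instance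

-- ===== CLAIM (what is proved, stated in full; the proofs are below) =====
def Claim_equal_merge_model_init_kwargs_py : Prop := ∀ (base : List (String × List (String × Int))) (extra : List (String × List (String × Int))), Dom_merge_model_init_kwargs_py base extra → Pre_merge_model_init_kwargs_py base extra → Spec_merge_model_init_kwargs_py base extra (merge_model_init_kwargs_py base extra)

-- ===== LEMMAS AND PROOFS =====

-- inserting at a key the dict already has commutes with inserting at a different key

-- inserting at a key the dict already has commutes with inserting at a different key
lemma pv_ins_comm {ν : Type} (d : PySem.Dict String ν) (k k' : String) (w x : ν)
    (hc : d.contains k = true) (hne : k' ≠ k) :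
    (d.insert k' x).insert k w = (d.insert k w).insert k' x := by
  apply PySem.Dict.ext
  by_cases hck' : d.contains k' = true
  · have h1 : (d.insert k' x).contains k = true := by
      simp [PySem.Dict.contains_insert, hc]
    have h2 : (d.insert k w).contains k' = true := by
      simp [PySem.Dict.contains_insert, hck']
    rw [PySem.Dict.items_insert_of_contains _ _ h1,
        PySem.Dict.items_insert_of_contains _ _ hck',
        PySem.Dict.items_insert_of_contains _ _ h2,
        PySem.Dict.items_insert_of_contains _ _ hc]
    simp only [List.map_map]
    apply List.map_congr_left
    intro p _
    by_cases hk' : p.1 = k' <;> by_cases hk : p.1 = k <;>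
      simp_all [Function.comp, Ne.symm hne]
  · have hck'' : d.contains k' = false := by simpa using hck'
    have h1 : (d.insert k' x).contains k = true := by
      simp [PySem.Dict.contains_insert, hc]
    have h2 : (d.insert k w).contains k' = false := by
      simp [PySem.Dict.contains_insert, hck'', hne]
    rw [PySem.Dict.items_insert_of_contains _ _ h1,
        PySem.Dict.items_insert_of_not_contains _ _ hck'',
        PySem.Dict.items_insert_of_not_contains _ _ h2,
        PySem.Dict.items_insert_of_contains _ _ hc]
    simp [hne]

-- a pending overwrite at a contained key commutes through a fold of inserts at other keys
lemma pv_foldl_ins_insert {ν : Type} (l : List (String × ν)) (v : String × ν → ν)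
    (d : PySem.Dict String ν) (k : String) (w : ν)
    (hc : d.contains k = true) (hl : ∀ p ∈ l, p.1 ≠ k) :
    (l.foldl (fun d p => d.insert p.1 (v p)) d).insert k w
      = l.foldl (fun d p => d.insert p.1 (v p)) (d.insert k w) := by
  induction l generalizing d with
  | nil => rfl
  | cons p rest ih =>
    simp only [List.foldl_cons]
    rw [ih _ (by simp [PySem.Dict.contains_insert, hc]) (fun q hq => hl q (List.mem_cons_of_mem _ hq)),
        pv_ins_comm _ _ _ _ _ hc (hl p (List.mem_cons_self ..))]

-- overwriting key k after a fold over pairs whose keys include k (all distinct) = folding with the value swapped at k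
lemma pv_overwrite_in_fold {ν : Type} (l : List (String × ν)) (v : String × ν → ν)
    (d0 : PySem.Dict String ν) (k : String) (w : ν)
    (hnd : (l.map Prod.fst).Nodup) (hk : k ∈ l.map Prod.fst) :
    (l.foldl (fun d p => d.insert p.1 (v p)) d0).insert k w
      = l.foldl (fun d p => d.insert p.1 (if p.1 = k then w else v p)) d0 := by
  induction l generalizing d0 with
  | nil => cases hk
  | cons p rest ih =>
    simp only [List.map_cons, List.nodup_cons] at hnd
    simp only [List.foldl_cons]
    by_cases hpk : p.1 = k
    · have hrest : ∀ q ∈ rest, q.1 ≠ k := by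
        intro q hq hqk
        exact hnd.1 (hpk ▸ hqk ▸ List.mem_map_of_mem hq)
      rw [pv_foldl_ins_insert _ _ _ _ _ (hpk ▸ PySem.Dict.contains_insert_self d0 p.1 (v p)) hrest,
          hpk, PySem.Dict.insert_insert_self, if_pos (rfl : k = k)]
      exact PySem.List.foldl_congr_mem _ _ _ _ (fun acc q hq => by rw [if_neg (hrest q hq)])
    · have hk' : k ∈ rest.map Prod.fst := by
        rcases List.mem_map.mp hk with ⟨q, hq, hq1⟩
        rcases List.mem_cons.mp hq with h | h
        · exact absurd (h ▸ hq1) hpk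
        · exact hq1 ▸ List.mem_map_of_mem h
      rw [ih _ hnd.2 hk', if_neg hpk]

-- A's loop never re-reads a key it wrote (extra's keys are distinct), so its getD reads base
lemma pv_A_fold_eq (l : List (String × List (String × Int)))
    (d0 b0 : PySem.Dict String (List (String × Int)))
    (hnd : (l.map Prod.fst).Nodup)
    (hag : ∀ p ∈ l, d0.getD p.1 [] = b0.getD p.1 []) :
    l.foldl (fun merged kv =>
        if kv.1 == "model_kwargs" || kv.1 == "extra_body" then
          merged.insert kv.1 (pvDictUpdate (merged.getD kv.1 []) kv.2)
        else merged.insert kv.1 kv.2) d0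
      = l.foldl (fun d kv => d.insert kv.1
          (if kv.1 == "model_kwargs" || kv.1 == "extra_body" then
            pvDictUpdate (b0.getD kv.1 []) kv.2 else kv.2)) d0 := by
  induction l generalizing d0 with
  | nil => rfl
  | cons p rest ih =>
    simp only [List.map_cons, List.nodup_cons] at hnd
    have hag' : ∀ (x : List (String × Int)), ∀ q ∈ rest,
        (d0.insert p.1 x).getD q.1 [] = b0.getD q.1 [] := by
      intro x q hq
      rw [PySem.Dict.getD_insert_of_ne _ _ _
        (fun h => hnd.1 (by rw [← h]; exact List.mem_map_of_mem hq))]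
      exact hag q (List.mem_cons_of_mem _ hq)
    simp only [List.foldl_cons]
    by_cases hp : (p.1 == "model_kwargs" || p.1 == "extra_body") = true
    · rw [if_pos hp, if_pos hp, hag p (List.mem_cons_self ..)]
      exact ih _ hnd.2 (hag' _)
    · rw [if_neg hp, if_neg hp]
      exact ih _ hnd.2 (hag' _)

-- the value B's fixup writes at `key` (irrelevant default when key ∉ extra)
def pvFixVal (base extra : List (String × List (String × Int))) (key : String) : List (String × Int) :=
  match PySem.Dict.get? (PySem.Dict.mk extra) key with
  | none => []
  | some v =>
    match PySem.Dict.get? (PySem.Dict.mk base) key with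
    | some cur => pvDictUpdate cur v
    | none => v

-- one fixup pass over a fold = the fold with the value swapped at that key
lemma pv_fix_eq (base extra : List (String × List (String × Int)))
    (v : String × List (String × Int) → List (String × Int)) (key : String)
    (hnd : (extra.map Prod.fst).Nodup) :
    pvFixKey base extra (extra.foldl (fun d p => d.insert p.1 (v p)) (PySem.Dict.mk base)) key
      = extra.foldl (fun d p => d.insert p.1
          (if p.1 = key then pvFixVal base extra key else v p)) (PySem.Dict.mk base) := by
  unfold pvFixKey
  cases h : PySem.Dict.get? (PySem.Dict.mk extra) key with
  | none =>
    have hk : key ∉ extra.map Prod.fst := by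
      have := (PySem.Dict.get?_eq_none_iff_not_mem_keys (PySem.Dict.mk extra) key).mp h
      simpa [PySem.Dict.keys] using this
    exact PySem.List.foldl_congr_mem extra _ _ _ (fun acc p hp => by
      rw [if_neg (fun hpk => hk (by rw [← hpk]; exact List.mem_map_of_mem hp))])
  | some v0 =>
    have hk : key ∈ extra.map Prod.fst := by
      have := PySem.Dict.mem_items_of_get?_eq_some _ h
      exact List.mem_map.mpr ⟨(key, v0), this, rfl⟩
    have hval : (match PySem.Dict.get? (PySem.Dict.mk base) key with
        | some cur => PySem.Dict.insert (extra.foldl (fun d p => d.insert p.1 (v p)) (PySem.Dict.mk base)) key (pvDictUpdate cur v0)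
        | none => PySem.Dict.insert (extra.foldl (fun d p => d.insert p.1 (v p)) (PySem.Dict.mk base)) key v0)
        = (extra.foldl (fun d p => d.insert p.1 (v p)) (PySem.Dict.mk base)).insert key (pvFixVal base extra key) := by
      unfold pvFixVal
      rw [h]
      cases PySem.Dict.get? (PySem.Dict.mk base) key <;> rfl
    exact hval.trans (pv_overwrite_in_fold extra v (PySem.Dict.mk base) key (pvFixVal base extra key) hnd hk)

-- building a dict from scratch out of a duplicate-free item list gives that list back
lemma pv_dictUpdate_nil (v : List (String × Int)) (h : (v.map Prod.fst).Nodup) :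
    pvDictUpdate [] v = v := by
  unfold pvDictUpdate
  rw [PySem.Dict.items_foldl_insert_fresh v Prod.fst Prod.snd (PySem.Dict.mk [])
    (fun a _ => rfl) h]
  simp

-- for a key actually present in extra, B's fixup value is A's deep-merge value
lemma pv_fixVal_eq (base extra : List (String × List (String × Int)))
    (p : String × List (String × Int)) (hp : p ∈ extra)
    (hnd : (extra.map Prod.fst).Nodup) (hin : (p.2.map Prod.fst).Nodup) :
    pvFixVal base extra p.1 = pvDictUpdate ((PySem.Dict.mk base).getD p.1 []) p.2 := by
  have hget : (PySem.Dict.mk extra).get? p.1 = some p.2 :=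
    PySem.Dict.get?_of_mem_items _ (by simpa using hp) (by simpa [PySem.Dict.keys] using hnd)
  unfold pvFixVal
  rw [hget]
  cases hb : (PySem.Dict.mk base).get? p.1 with
  | some cur => rw [PySem.Dict.getD_of_get?_eq_some _ _ hb]
  | none => rw [PySem.Dict.getD_of_get?_eq_none _ _ hb, pv_dictUpdate_nil _ hin]

-- ===== VERDICT (by name: the statement is the Claim_ definition above) =====
theorem merge_model_init_kwargs_py_spec : Claim_equal_merge_model_init_kwargs_py := by
  intro base extra _ hpre
  obtain ⟨hnd, hin⟩ := hpre
  unfold Spec_merge_model_init_kwargs_py merge_model_init_kwargs_py merge_model_init_kwargs_py_alt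
  have hA := pv_A_fold_eq extra (PySem.Dict.mk base) (PySem.Dict.mk base) hnd (fun _ _ => rfl)
  have e1 : pvFixKey base extra
      (extra.foldl (fun d p => d.insert p.1 p.2) (PySem.Dict.mk base)) "model_kwargs"
      = extra.foldl (fun d p => d.insert p.1
          (if p.1 = "model_kwargs" then pvFixVal base extra "model_kwargs" else p.2))
          (PySem.Dict.mk base) :=
    pv_fix_eq base extra (fun p => p.2) "model_kwargs" hnd
  have e2 : pvFixKey base extra
      (extra.foldl (fun d p => d.insert p.1
          (if p.1 = "model_kwargs" then pvFixVal base extra "model_kwargs" else p.2))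
          (PySem.Dict.mk base)) "extra_body"
      = extra.foldl (fun d p => d.insert p.1
          (if p.1 = "extra_body" then pvFixVal base extra "extra_body"
           else if p.1 = "model_kwargs" then pvFixVal base extra "model_kwargs" else p.2))
          (PySem.Dict.mk base) :=
    pv_fix_eq base extra
      (fun p => if p.1 = "model_kwargs" then pvFixVal base extra "model_kwargs" else p.2)
      "extra_body" hnd
  have hcong : extra.foldl (fun d kv => d.insert kv.1
        (if kv.1 == "model_kwargs" || kv.1 == "extra_body" then
          pvDictUpdate ((PySem.Dict.mk base).getD kv.1 []) kv.2 else kv.2)) (PySem.Dict.mk base)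
      = extra.foldl (fun d p => d.insert p.1
          (if p.1 = "extra_body" then pvFixVal base extra "extra_body"
           else if p.1 = "model_kwargs" then pvFixVal base extra "model_kwargs" else p.2))
          (PySem.Dict.mk base) := by
    apply PySem.List.foldl_congr_mem
    intro acc p hp
    congr 1
    by_cases h2 : p.1 = "extra_body"
    · rw [if_pos (by simp [h2]), if_pos h2, ← h2,
        pv_fixVal_eq base extra p hp hnd (hin p hp)]
    · by_cases h1 : p.1 = "model_kwargs"
      · rw [if_pos (by simp [h1]), if_neg h2, if_pos h1, ← h1,
          pv_fixVal_eq base extra p hp hnd (hin p hp)]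
      · rw [if_neg (by simp [h1, h2]), if_neg h2, if_neg h1]
  show _ = (pvFixKey base extra (pvFixKey base extra _ "model_kwargs") "extra_body").items
  rw [e1, e2]
  exact congrArg PySem.Dict.items (hA.trans hcong)
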